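-- pv_equiv track=rewrite | github.com/jangel97/text-to-mongo | tools/core.py | resolve_collection
-- ===== SOURCE A (Python) =====
-- def resolve_collection(question: str, keywords_map: dict[str, list[str] | set[str]]) -> str | None:
--     """Score each collection by keyword hits and return the best match."""
--     q = question.lower()
--     scores: dict[str, int] = {}
--     for collection, keywords in keywords_map.items():
--         score = sum(1 for kw in keywords if kw in q)
--         if score > 0:
--             scores[collection] = score
--     if not scores:
--         return None
--     return max(scores, key=scores.get)  # type: ignore[arg-type]
-- ===== SOURCE B (Python) =====
-- def resolve_collection(question: str, keywords_map: dict) -> str | None: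
--     """Staged: (1) test every keyword against the question once, collecting the set of
--     matched keywords; (2) score collections by membership in that set; (3) pick the
--     first maximum and require it positive."""
--     q = question.lower()
--     matched = {kw for keywords in keywords_map.values() for kw in keywords if kw in q}
--     scored = [(c, sum(kw in matched for kw in keywords)) for c, keywords in keywords_map.items()]
--     best, score = max(scored, key=lambda t: t[1], default=(None, 0))
--     return best if score > 0 else None
-- ===== Notes on version B (the rewrite author's own statement) =====
-- stated objective: alternative
-- what changed: A interleaves substring tests, a per-collection count, a scores dict and a final max(key=scores.get) rescan; B is staged: it first builds the set of all keywords that match the question (each keyword's substring test done in its own pass), then scores collections by set membership in a comprehension, then selects with max(..., default=(None,0)) and a positivity check.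
import Mathlib
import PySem

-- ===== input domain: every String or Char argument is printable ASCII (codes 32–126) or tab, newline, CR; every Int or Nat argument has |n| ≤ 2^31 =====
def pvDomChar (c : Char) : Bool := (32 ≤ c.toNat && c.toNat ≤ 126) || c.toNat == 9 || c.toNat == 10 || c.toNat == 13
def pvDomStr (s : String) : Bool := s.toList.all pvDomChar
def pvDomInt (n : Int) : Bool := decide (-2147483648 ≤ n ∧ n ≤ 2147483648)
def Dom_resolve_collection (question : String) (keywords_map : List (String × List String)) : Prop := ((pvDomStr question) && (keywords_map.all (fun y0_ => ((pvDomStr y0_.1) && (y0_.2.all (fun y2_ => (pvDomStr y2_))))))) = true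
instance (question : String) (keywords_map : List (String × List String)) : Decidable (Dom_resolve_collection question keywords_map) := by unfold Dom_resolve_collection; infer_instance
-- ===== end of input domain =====

-- B replaces A's interleaved count-into-dict-then-max shape by staged passes through a
-- matched-keyword set (test each keyword once, score by set membership, select with a
-- defaulted max); objective: alternative.

-- ===== PORT A =====
def resolve_collection (question : String) (keywords_map : List (String × List String)) : Option String :=
  let q := PySem.Str.lower question
  let scores : PySem.Dict String Int :=
    (PySem.Dict.ofList keywords_map).items.foldl
      (fun scores p =>
        let score : Int := p.2.foldl (fun acc kw => if PySem.Str.isIn kw q then acc + 1 else acc) 0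
        if score > 0 then scores.insert p.1 score else scores)
      PySem.Dict.empty
  if scores.items = [] then none
  else PySem.List.max? scores.keys (fun k => scores.getD k 0)  -- scores.get k is always present here

-- ===== PORT B =====
def resolve_collection_alt (question : String) (keywords_map : List (String × List String)) : Option String :=
  let q := PySem.Str.lower question
  let items := (PySem.Dict.ofList keywords_map).items
  -- matched = {kw for keywords in values for kw in keywords if kw in q}
  let matched : PySem.Set String :=
    items.foldl
      (fun s p => p.2.foldl (fun s kw => if PySem.Str.isIn kw q then PySem.Set.add s kw else s) s)
      PySem.Set.empty
  -- scored = [(c, sum(kw in matched for kw in keywords)) …]  (None modelled as the Option in the pair)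
  let scored : List (Option String × Int) :=
    items.map (fun p => (some p.1, p.2.foldl (fun acc kw => acc + (if PySem.Set.contains matched kw then 1 else 0)) 0))
  -- best, score = max(scored, key=lambda t: t[1], default=(None, 0))
  let bs := (PySem.List.max? scored (fun t => t.2)).getD (none, 0)
  if bs.2 > 0 then bs.1 else none

-- ===== PRECONDITION & SPEC =====
def Spec_resolve_collection (question : String) (keywords_map : List (String × List String)) (out : Option String) : Prop := out = resolve_collection_alt question keywords_map
instance (question : String) (keywords_map : List (String × List String)) (out : Option String) : Decidable (Spec_resolve_collection question keywords_map out) := by unfold Spec_resolve_collection; infer_instance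

-- ===== CLAIM (what is proved, stated in full; the proofs are below) =====
def Claim_equal_resolve_collection : Prop := ∀ (question : String) (keywords_map : List (String × List String)), Dom_resolve_collection question keywords_map → Spec_resolve_collection question keywords_map (resolve_collection question keywords_map)

-- ===== LEMMAS AND PROOFS =====

-- score of one (collection, keywords) pair, as A computes it
def pvScore (q : String) (p : String × List String) : Int :=
  p.2.foldl (fun acc kw => if PySem.Str.isIn kw q then acc + 1 else acc) 0

-- A's scores dict built over a list of pairs
def pvDictA (q : String) (l : List (String × List String)) : PySem.Dict String Int :=
  l.foldl
    (fun scores p =>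
      let score : Int := p.2.foldl (fun acc kw => if PySem.Str.isIn kw q then acc + 1 else acc) 0
      if score > 0 then scores.insert p.1 score else scores)
    PySem.Dict.empty

-- proof-side abstraction of a running-best pass, the common denominator of both programs
def pvBestB (q : String) (l : List (String × List String)) : Option String × Int :=
  l.foldl
    (fun (best : Option String × Int) p =>
      let score : Int := p.2.foldl (fun acc kw => if PySem.Str.isIn kw q then acc + 1 else acc) 0
      if score > best.2 then (some p.1, score) else best)
    (none, 0)

-- B's matched-keyword set over a list of pairs
def pvMatched (q : String) (l : List (String × List String)) : PySem.Set String :=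
  l.foldl
    (fun s p => p.2.foldl (fun s kw => if PySem.Str.isIn kw q then PySem.Set.add s kw else s) s)
    PySem.Set.empty

-- the score max(scores, key=scores.get) compares at an optional key
def pvKeyOf (d : PySem.Dict String Int) (o : Option String) : Int :=
  match o with
  | none => 0
  | some m => d.getD m 0

theorem pvDictA_append (q : String) (l : List (String × List String)) (p : String × List String) :
    pvDictA q (l ++ [p]) =
      if pvScore q p > 0 then (pvDictA q l).insert p.1 (pvScore q p) else pvDictA q l := by
  unfold pvDictA
  rw [List.foldl_append]
  rfl

theorem pvBestB_append (q : String) (l : List (String × List String)) (p : String × List String) :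
    pvBestB q (l ++ [p]) =
      if pvScore q p > (pvBestB q l).2 then (some p.1, pvScore q p) else pvBestB q l := by
  unfold pvBestB
  rw [List.foldl_append]
  rfl

theorem pvKeys_subset (q : String) (l : List (String × List String)) :
    (pvDictA q l).keys ⊆ l.map Prod.fst := by
  induction l using List.reverseRecOn with
  | nil => simp [pvDictA, PySem.Dict.empty, PySem.Dict.keys]
  | append_singleton l p ih =>
    rw [pvDictA_append]
    intro k hk
    rw [List.map_append]
    split at hk
    · rcases (PySem.Dict.mem_keys_insert _ _ _ _).1 hk with h | h
      · simp [h]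
      · exact List.mem_append_left _ (ih h)
    · exact List.mem_append_left _ (ih hk)

theorem pvValues_pos (q : String) (l : List (String × List String)) :
    ∀ k ∈ (pvDictA q l).keys, 0 < (pvDictA q l).getD k 0 := by
  induction l using List.reverseRecOn with
  | nil =>
    intro k hk
    simp [pvDictA, PySem.Dict.empty, PySem.Dict.keys] at hk
  | append_singleton l p ih =>
    rw [pvDictA_append]
    split
    · rename_i hs
      intro k hk
      rw [PySem.Dict.getD_insert]
      by_cases hkp : k = p.1
      · rw [if_pos hkp]; omega
      · rw [if_neg hkp]
        rcases (PySem.Dict.mem_keys_insert _ _ _ _).1 hk with h | h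
        · exact absurd h hkp
        · exact ih k h
    · exact ih

-- max?'s foldl only looks at keys of list elements and of the accumulator
theorem pvFoldMax_congr {α κ : Type} [LT κ] [DecidableLT κ] (key key' : α → κ)
    (ks : List α) (hks : ∀ x ∈ ks, key x = key' x) :
    ∀ (acc : Option α), (∀ m, acc = some m → key m = key' m) →
      ks.foldl (fun acc x => match acc with
          | none => some x
          | some m => if key m < key x then some x else some m) acc
      = ks.foldl (fun acc x => match acc with
          | none => some x
          | some m => if key' m < key' x then some x else some m) acc := by
  induction ks with
  | nil => intro acc _; rfl
  | cons x t ih =>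
    intro acc hacc
    have hx : key x = key' x := hks x List.mem_cons_self
    have ht : ∀ y ∈ t, key y = key' y := fun y hy => hks y (List.mem_cons_of_mem _ hy)
    simp only [List.foldl_cons]
    cases acc with
    | none =>
      apply ih ht
      intro m hm
      cases hm
      exact hx
    | some m0 =>
      have hm0 : key m0 = key' m0 := hacc m0 rfl
      simp only [hm0, hx]
      apply ih ht
      intro m hm
      by_cases hc : key' m0 < key' x
      · rw [if_pos hc] at hm; cases hm; exact hx
      · rw [if_neg hc] at hm; cases hm; exact hm0

theorem pvMax_append {α κ : Type} [LT κ] [DecidableLT κ] (key : α → κ) (ks : List α) (k : α) :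
    PySem.List.max? (ks ++ [k]) key =
      match PySem.List.max? ks key with
      | none => some k
      | some m => if key m < key k then some k else some m := by
  simp only [PySem.List.max?, List.foldl_append, List.foldl_cons, List.foldl_nil]
  rfl

-- invariant A: B's running state is A's first-maximum key together with its score
theorem pvMain (q : String) (l : List (String × List String))
    (h : (l.map Prod.fst).Nodup) :
    pvBestB q l =
      (PySem.List.max? (pvDictA q l).keys (fun k => (pvDictA q l).getD k 0),
       pvKeyOf (pvDictA q l) (PySem.List.max? (pvDictA q l).keys (fun k => (pvDictA q l).getD k 0))) := by
  induction l using List.reverseRecOn with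
  | nil => simp [pvBestB, pvDictA, PySem.Dict.empty, PySem.Dict.keys, PySem.List.max?, pvKeyOf]
  | append_singleton l p ih =>
    rw [List.map_append, List.nodup_append] at h
    obtain ⟨h1, _, hdisj⟩ := h
    have hfresh : p.1 ∉ (pvDictA q l).keys := by
      intro hm
      exact hdisj p.1 (pvKeys_subset q l hm) p.1 (by simp) rfl
    have hnotc : (pvDictA q l).contains p.1 = false := by
      rw [← Bool.not_eq_true, PySem.Dict.contains_iff_mem_keys]
      exact hfresh
    have ihl := ih h1
    rw [pvBestB_append, pvDictA_append, ihl]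
    by_cases hs : pvScore q p > 0
    · rw [if_pos hs]
      have hkeys : ((pvDictA q l).insert p.1 (pvScore q p)).keys = (pvDictA q l).keys ++ [p.1] :=
        PySem.Dict.keys_insert_of_not_contains (pvDictA q l) (pvScore q p) hnotc
      have hgetD : ∀ k, ((pvDictA q l).insert p.1 (pvScore q p)).getD k 0 =
          if k = p.1 then pvScore q p else (pvDictA q l).getD k 0 :=
        fun k => PySem.Dict.getD_insert _ _ _ _ _
      rw [hkeys, pvMax_append]
      have hcongr : PySem.List.max? (pvDictA q l).keys
            (fun k => ((pvDictA q l).insert p.1 (pvScore q p)).getD k 0)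
          = PySem.List.max? (pvDictA q l).keys (fun k => (pvDictA q l).getD k 0) := by
        apply pvFoldMax_congr
        · intro x hx
          rw [hgetD x, if_neg]
          intro hxe
          exact hfresh (hxe ▸ hx)
        · intro m hm
          cases hm
      rw [hcongr]
      cases hmax : PySem.List.max? (pvDictA q l).keys (fun k => (pvDictA q l).getD k 0) with
      | none =>
        have hgp : ((pvDictA q l).insert p.1 (pvScore q p)).getD p.1 0 = pvScore q p := by
          rw [hgetD p.1, if_pos rfl]
        simp [pvKeyOf, hs, hgp]
      | some m =>
        have hmem : m ∈ (pvDictA q l).keys := PySem.List.max?_mem hmax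
        have hmne : m ≠ p.1 := fun he => hfresh (he ▸ hmem)
        have hgm : ((pvDictA q l).insert p.1 (pvScore q p)).getD m 0 = (pvDictA q l).getD m 0 := by
          rw [hgetD m, if_neg hmne]
        have hgp : ((pvDictA q l).insert p.1 (pvScore q p)).getD p.1 0 = pvScore q p := by
          rw [hgetD p.1, if_pos rfl]
        simp only [pvKeyOf, hgm, hgp]
        by_cases hlt : (pvDictA q l).getD m 0 < pvScore q p
        · simp [hlt, gt_iff_lt]
        · simp [hlt, gt_iff_lt, hgm]
    · -- score ≤ 0: neither side updates
      rw [if_neg hs]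
      cases hmax : PySem.List.max? (pvDictA q l).keys (fun k => (pvDictA q l).getD k 0) with
      | none =>
        simp [pvKeyOf, hs]
      | some m =>
        have hmem : m ∈ (pvDictA q l).keys := PySem.List.max?_mem hmax
        have hpos := pvValues_pos q l m hmem
        have hnc : ¬ (pvScore q p > (some m, pvKeyOf (pvDictA q l) (some m)).2) := by
          simp only [pvKeyOf]
          omega
        rw [if_neg hnc]

theorem pvMax_empty_keys (d : PySem.Dict String Int) (h : d.items = []) :
    PySem.List.max? d.keys (fun k => d.getD k 0) = none := by
  have hk : d.keys = [] := by simp [PySem.Dict.keys, h]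
  rw [hk]
  rfl

-- ===== lemmas for the B side =====

-- membership in the inner fold of pvMatched
theorem pvInner_mem (q : String) (kws : List String) (s : PySem.Set String) (kw : String) :
    kw ∈ kws.foldl (fun s kw => if PySem.Str.isIn kw q then PySem.Set.add s kw else s) s ↔
      kw ∈ s ∨ (kw ∈ kws ∧ PySem.Str.isIn kw q = true) := by
  induction kws generalizing s with
  | nil => simp
  | cons x t ih =>
    simp only [List.foldl_cons]
    by_cases hx : PySem.Str.isIn x q = true
    · rw [if_pos hx, ih]
      simp only [PySem.Set.mem_add, List.mem_cons]
      constructor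
      · rintro (⟨h | h⟩ | h)
        · exact Or.inl h
        · exact Or.inr ⟨Or.inl h, h ▸ hx⟩
        · exact Or.inr ⟨Or.inr h.1, h.2⟩
      · rintro (h | ⟨h | h, hin⟩)
        · exact Or.inl (Or.inl h)
        · exact Or.inl (Or.inr h)
        · exact Or.inr ⟨h, hin⟩
    · rw [if_neg hx, ih]
      simp only [List.mem_cons]
      constructor
      · rintro (h | h)
        · exact Or.inl h
        · exact Or.inr ⟨Or.inr h.1, h.2⟩
      · rintro (h | ⟨h | h, hin⟩)
        · exact Or.inl h
        · exact absurd (h ▸ hin) hx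
        · exact Or.inr ⟨h, hin⟩

theorem pvMatched_mem (q : String) (l : List (String × List String)) (kw : String) :
    kw ∈ pvMatched q l ↔ (∃ p ∈ l, kw ∈ p.2) ∧ PySem.Str.isIn kw q = true := by
  unfold pvMatched
  induction l using List.reverseRecOn with
  | nil => simp [PySem.Set.empty]
  | append_singleton l p ih =>
    rw [List.foldl_append, List.foldl_cons, List.foldl_nil, pvInner_mem, ih]
    constructor
    · rintro (⟨⟨r, hr, hkw⟩, hin⟩ | ⟨h, hin⟩)
      · exact ⟨⟨r, List.mem_append_left _ hr, hkw⟩, hin⟩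
      · exact ⟨⟨p, List.mem_append_right _ (by simp), h⟩, hin⟩
    · rintro ⟨⟨r, hr, hkw⟩, hin⟩
      rcases List.mem_append.1 hr with h | h
      · exact Or.inl ⟨⟨r, h, hkw⟩, hin⟩
      · have : r = p := by simpa using h
        exact Or.inr ⟨this ▸ hkw, hin⟩

-- for a keyword of a pair in l, set membership equals the substring test
theorem pvContains_eq (q : String) (l : List (String × List String))
    (p : String × List String) (hp : p ∈ l) (kw : String) (hkw : kw ∈ p.2) :
    PySem.Set.contains (pvMatched q l) kw = PySem.Str.isIn kw q := by
  by_cases h : PySem.Str.isIn kw q = true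
  · rw [h, (PySem.Set.contains_iff _ _).2 ((pvMatched_mem q l kw).2 ⟨⟨p, hp, hkw⟩, h⟩)]
  · rw [Bool.eq_false_iff.2 h]
    rw [← Bool.not_eq_true]
    intro hc
    exact h ((pvMatched_mem q l kw).1 ((PySem.Set.contains_iff _ _).1 hc)).2

-- B's membership-count fold equals A's substring-count fold on pairs of l
theorem pvScoreB_eq (q : String) (l : List (String × List String))
    (p : String × List String) (hp : p ∈ l) :
    p.2.foldl (fun acc kw => acc + (if PySem.Set.contains (pvMatched q l) kw then 1 else 0)) 0
      = pvScore q p := by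
  unfold pvScore
  have key : ∀ (kws : List String), (∀ kw ∈ kws, kw ∈ p.2) → ∀ (acc : Int),
      kws.foldl (fun acc kw => acc + (if PySem.Set.contains (pvMatched q l) kw then 1 else 0)) acc
        = kws.foldl (fun acc kw => if PySem.Str.isIn kw q then acc + 1 else acc) acc := by
    intro kws
    induction kws with
    | nil => intro _ acc; rfl
    | cons x t ih =>
      intro hsub acc
      simp only [List.foldl_cons]
      rw [pvContains_eq q l p hp x (hsub x List.mem_cons_self)]
      by_cases hx : PySem.Str.isIn x q = true
      · rw [if_pos hx, if_pos hx]
        exact ih (fun kw hkw => hsub kw (List.mem_cons_of_mem _ hkw)) (acc + 1)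
      · rw [if_neg hx, if_neg hx, add_zero]
        exact ih (fun kw hkw => hsub kw (List.mem_cons_of_mem _ hkw)) acc
  exact key p.2 (fun _ h => h) 0

theorem pvScore_nonneg (q : String) (p : String × List String) : 0 ≤ pvScore q p := by
  unfold pvScore
  have key : ∀ (kws : List String) (acc : Int),
      acc ≤ kws.foldl (fun acc kw => if PySem.Str.isIn kw q then acc + 1 else acc) acc := by
    intro kws
    induction kws with
    | nil => intro acc; exact le_refl _
    | cons x t ih =>
      intro acc
      simp only [List.foldl_cons]
      by_cases hx : PySem.Str.isIn x q = true
      · rw [if_pos hx]; exact le_trans (by omega) (ih (acc + 1))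
      · rw [if_neg hx]; exact ih acc
  exact key p.2 0

-- invariant B: the defaulted, thresholded max over the scored list is the running best
theorem pvSelect (q : String) (l : List (String × List String)) :
    (match PySem.List.max? (l.map (fun p => ((some p.1 : Option String), pvScore q p))) (fun t => t.2) with
      | none => ((none : Option String), (0 : Int))
      | some m => if m.2 > 0 then m else (none, 0))
      = pvBestB q l := by
  induction l using List.reverseRecOn with
  | nil => simp [pvBestB, PySem.List.max?]
  | append_singleton l p ih =>
    rw [pvBestB_append, ← ih, List.map_append, List.map_cons, List.map_nil, pvMax_append]
    have hsp : 0 ≤ pvScore q p := pvScore_nonneg q p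
    cases hmax : PySem.List.max? (l.map (fun p => ((some p.1 : Option String), pvScore q p))) (fun t => t.2) with
    | none =>
      simp
    | some m =>
      rcases List.mem_map.1 (PySem.List.max?_mem hmax) with ⟨r, _, hr⟩
      have hm2 : 0 ≤ m.2 := by rw [← hr]; exact pvScore_nonneg q r
      clear ih
      by_cases hlt : m.2 < pvScore q p <;> by_cases hm : (0:Int) < m.2 <;>
        split_ifs <;> simp_all [apply_ite (Prod.snd : Option String × Int → Int)] <;>
          first | omega | (split_ifs <;> simp_all <;> omega)

-- ===== VERDICT (by name: the statement is the Claim_ definition above) =====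
theorem resolve_collection_spec : Claim_equal_resolve_collection := by
  intro question keywords_map _
  unfold Spec_resolve_collection
  set q := PySem.Str.lower question with hq
  set items := (PySem.Dict.ofList keywords_map).items with hitems
  have hnd : ((items.map Prod.fst).Nodup) := PySem.Dict.nodup_keys_ofList keywords_map
  have hA : resolve_collection question keywords_map =
      (if (pvDictA q items).items = [] then none
       else PySem.List.max? (pvDictA q items).keys (fun k => (pvDictA q items).getD k 0)) := rfl
  have hB : resolve_collection_alt question keywords_map =
      (let bs : Option String × Int :=
        (PySem.List.max? (items.map (fun p => ((some p.1 : Option String),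
            p.2.foldl (fun acc kw => acc + (if PySem.Set.contains (pvMatched q items) kw then 1 else 0)) 0)))
          (fun t => t.2)).getD (none, 0)
       if bs.2 > 0 then bs.1 else none) := rfl
  have hscored : items.map (fun p => ((some p.1 : Option String),
        p.2.foldl (fun acc kw => acc + (if PySem.Set.contains (pvMatched q items) kw then 1 else 0)) 0))
      = items.map (fun p => ((some p.1 : Option String), pvScore q p)) := by
    apply List.map_congr_left
    intro p hp
    rw [pvScoreB_eq q items p hp]
  rw [hA, hB, hscored]
  have hmain := pvMain q items hnd
  have hsel := pvSelect q items
  cases hmax : PySem.List.max? (items.map (fun p => ((some p.1 : Option String), pvScore q p))) (fun t => t.2) with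
  | none =>
    rw [hmax] at hsel
    simp only [Option.getD_none]
    rw [if_neg (by omega : ¬ ((((none : Option String), (0:Int))).2 > 0))]
    have hb : pvBestB q items = ((none : Option String), (0 : Int)) := hsel.symm
    rw [hmain] at hb
    have hAnone : PySem.List.max? (pvDictA q items).keys (fun k => (pvDictA q items).getD k 0) = none :=
      congrArg Prod.fst hb
    split
    · rfl
    · rw [hAnone]
  | some m =>
    rw [hmax] at hsel
    have hsel2 : (if m.2 > 0 then m else ((none : Option String), (0 : Int))) = pvBestB q items := hsel
    simp only [Option.getD_some]
    by_cases hm : m.2 > 0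
    · rw [if_pos hm]
      rw [if_pos hm] at hsel2
      rw [hmain] at hsel2
      have hAeq : PySem.List.max? (pvDictA q items).keys (fun k => (pvDictA q items).getD k 0) = m.1 :=
        (congrArg Prod.fst hsel2).symm
      rcases List.mem_map.1 (PySem.List.max?_mem hmax) with ⟨r, _, hr⟩
      have hm1 : m.1 = some r.1 := by rw [← hr]
      split
      · rename_i hemp
        rw [pvMax_empty_keys _ hemp, hm1] at hAeq
        exact absurd hAeq.symm (by simp)
      · rw [hAeq]
    · rw [if_neg hm]
      rw [if_neg hm] at hsel2
      rw [hmain] at hsel2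
      have hAnone : PySem.List.max? (pvDictA q items).keys (fun k => (pvDictA q items).getD k 0) = none :=
        (congrArg Prod.fst hsel2).symm
      split
      · rfl
      · rw [hAnone]
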